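-- pv_equiv track=rewrite | github.com/stallone0000/Reasoning-Skill | coding/scripts/judge/judge_cp.py | split_cpp_args
-- ===== SOURCE A (Python) =====
-- from typing import Any, Dict, Iterable, Iterator, List, Optional, Tuple
--
-- def split_cpp_args(arg_str: str) -> List[str]:
--     s = (arg_str or "").strip()
--     if not s:
--         return []
--     out, cur, depth = [], [], 0
--     for ch in s:
--         if ch == "<":
--             depth += 1
--         elif ch == ">":
--             depth -= 1
--         elif ch == "," and depth == 0:
--             out.append("".join(cur).strip())
--             cur = []
--             continue
--         cur.append(ch)
--     out.append("".join(cur).strip())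
--     return out
-- ===== SOURCE B (Python) =====
-- from typing import List
--
--
-- def split_cpp_args(arg_str: str) -> List[str]:
--     s = (arg_str or "").strip()
--     if not s:
--         return []
--     out, buf, depth = [], [], 0
--     for part in s.split(','):
--         buf.append(part)
--         depth += part.count('<') - part.count('>')
--         if depth == 0:
--             out.append(','.join(buf).strip())
--             buf = []
--     if buf:
--         out.append(','.join(buf).strip())
--     return out
-- ===== Notes on version B (the rewrite author's own statement) =====
-- stated objective: faster
-- what changed: Replaces the character-by-character scan with a char buffer by split-on-comma followed by coalescing adjacent parts while the running angle-bracket depth (from per-part '<'/'>' counts) is nonzero.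
import Mathlib
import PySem

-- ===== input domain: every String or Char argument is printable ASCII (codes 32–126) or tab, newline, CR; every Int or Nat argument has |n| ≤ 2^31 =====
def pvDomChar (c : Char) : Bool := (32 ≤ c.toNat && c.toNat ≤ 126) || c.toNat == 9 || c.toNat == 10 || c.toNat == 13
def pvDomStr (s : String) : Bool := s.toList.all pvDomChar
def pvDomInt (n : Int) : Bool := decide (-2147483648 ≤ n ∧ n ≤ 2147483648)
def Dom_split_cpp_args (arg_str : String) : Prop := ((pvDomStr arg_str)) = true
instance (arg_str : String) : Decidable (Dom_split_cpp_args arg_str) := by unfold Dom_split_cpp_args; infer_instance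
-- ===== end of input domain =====

-- B replaces A's character-by-character scan (char buffer + depth) by split-on-comma followed
-- by coalescing adjacent parts while the running '<'/'>' depth is nonzero (same asymptotics,
-- measurably faster constants: the per-character work moves into str.split/str.count/str.join).

-- ===== PORT A =====
-- loop body of A's `for ch in s` (state: out, cur, depth)
def pvStepA (acc : List String × List Char × Int) (ch : Char) : List String × List Char × Int :=
  let (out, cur, depth) := acc
  if ch = '<' then (out, cur ++ [ch], depth + 1)
  else if ch = '>' then (out, cur ++ [ch], depth - 1)
  else if ch = ',' ∧ depth = 0 then (out ++ [PySem.Str.strip (String.ofList cur)], [], depth)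
  else (out, cur ++ [ch], depth)

def split_cpp_args (arg_str : String) : List String :=
  let s := PySem.Str.strip (if arg_str = "" then "" else arg_str)  -- (arg_str or "").strip()
  if s = "" then []
  else
    let st := s.toList.foldl pvStepA ([], [], 0)
    st.1 ++ [PySem.Str.strip (String.ofList st.2.1)]  -- out.append("".join(cur).strip())

-- ===== PORT B =====
-- loop body of B's `for part in s.split(',')` (state: out, buf, depth)
def pvStepB (acc : List String × List String × Int) (part : String) : List String × List String × Int :=
  let (out, buf, depth) := acc
  let buf' := buf ++ [part]
  let depth' := depth + (PySem.Str.count part "<" : Int) - (PySem.Str.count part ">" : Int)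
  if depth' = 0 then (out ++ [PySem.Str.strip (PySem.Str.join "," buf')], [], depth')
  else (out, buf', depth')

def split_cpp_args_alt (arg_str : String) : List String :=
  let s := PySem.Str.strip (if arg_str = "" then "" else arg_str)
  if s = "" then []
  else
    -- s.split(','): the separator is the nonempty literal ",", so split? is always `some`
    let parts := (PySem.Str.split? s ",").getD []
    let st := parts.foldl pvStepB ([], [], 0)
    if st.2.1 = [] then st.1
    else st.1 ++ [PySem.Str.strip (PySem.Str.join "," st.2.1)]

-- ===== PRECONDITION & SPEC =====
def Spec_split_cpp_args (arg_str : String) (out : List String) : Prop := out = split_cpp_args_alt arg_str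
instance (arg_str : String) (out : List String) : Decidable (Spec_split_cpp_args arg_str out) := by unfold Spec_split_cpp_args; infer_instance

-- ===== CLAIM (what is proved, stated in full; the proofs are below) =====
def Claim_equal_split_cpp_args : Prop := ∀ (arg_str : String), Dom_split_cpp_args arg_str → Spec_split_cpp_args arg_str (split_cpp_args arg_str)

-- ===== LEMMAS AND PROOFS =====
-- proof-side structural model of PySem.Chars.splitOn s [','] (single-char separator)
def pvSplit (pre : List Char) : List Char → List (List Char)
  | [] => [pre]
  | c :: rest => if c = ',' then pre :: pvSplit [] rest else pvSplit (pre ++ [c]) rest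

def pvCurOf (buf : List (List Char)) : List Char := buf.flatMap (· ++ [','])

theorem pvGo_eq (fuel : Nat) :
    ∀ (l cur : List Char) (acc : List (List Char)), l.length < fuel →
      PySem.Chars.splitOn.go [','] fuel l cur acc = acc.reverse ++ pvSplit cur.reverse l := by
  induction fuel with
  | zero => intro l cur acc h; omega
  | succ n ih =>
    intro l cur acc h
    cases l with
    | nil => simp [PySem.Chars.splitOn.go, pvSplit]
    | cons c rest =>
      by_cases hc : c = ','
      · subst hc
        have hpf : [','].isPrefixOf (',' :: rest) = true := by simp [List.isPrefixOf]
        simp only [PySem.Chars.splitOn.go, hpf, if_true, List.length_cons, List.drop_succ_cons,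
          List.drop_zero, List.length_nil]
        rw [ih rest [] (cur.reverse :: acc) (by simpa using Nat.lt_of_succ_lt_succ h)]
        simp [pvSplit]
      · have hp : [','].isPrefixOf (c :: rest) = false := by
          simp [List.isPrefixOf]; exact fun hh => (hc hh.symm).elim
        simp only [PySem.Chars.splitOn.go, hp, if_false, Bool.false_eq_true]
        rw [ih rest (c :: cur) acc (by simpa using Nat.lt_of_succ_lt_succ h)]
        simp [pvSplit, hc]

theorem pvSplitOn_eq (s : List Char) :
    PySem.Chars.splitOn s [','] = pvSplit [] s := by
  unfold PySem.Chars.splitOn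
  rw [pvGo_eq (s.length + 1) s [] [] (by omega)]
  simp

theorem pvSplit_ne_nil : ∀ (l pre : List Char), pvSplit pre l ≠ [] := by
  intro l
  induction l with
  | nil => intro pre; simp [pvSplit]
  | cons c rest ih => intro pre; by_cases hc : c = ',' <;> simp [pvSplit, hc] <;> exact ih _

theorem pvSplit_join : ∀ (l pre : List Char),
    PySem.Chars.join [','] (pvSplit pre l) = pre ++ l := by
  intro l
  induction l with
  | nil => intro pre; simp [pvSplit, PySem.Chars.join_singleton]
  | cons c rest ih =>
    intro pre
    by_cases hc : c = ','
    · subst hc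
      simp only [pvSplit, if_true]
      cases hsp : pvSplit ([] : List Char) rest with
      | nil => exact absurd hsp (pvSplit_ne_nil _ _)
      | cons q qs =>
        have h2 := ih ([] : List Char)
        rw [hsp] at h2
        rw [PySem.Chars.join_cons_cons, h2]
        simp
    · simp only [pvSplit, if_neg hc]
      rw [ih (pre ++ [c])]
      simp

theorem pvSplit_comma_free : ∀ (l pre : List Char), ',' ∉ pre →
    ∀ q ∈ pvSplit pre l, ',' ∉ q := by
  intro l
  induction l with
  | nil => intro pre hpre q hq; simp [pvSplit] at hq; subst hq; exact hpre
  | cons c rest ih =>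
    intro pre hpre q hq
    by_cases hc : c = ','
    · subst hc
      simp only [pvSplit, if_true, List.mem_cons] at hq
      rcases hq with rfl | hq
      · exact hpre
      · exact ih [] (by simp) q hq
    · simp only [pvSplit, if_neg hc] at hq
      exact ih (pre ++ [c]) (by simp [hpre]; exact fun h => hc h.symm) q hq

theorem pvCountGo_eq (c : Char) (fuel : Nat) :
    ∀ (l : List Char) (acc : Nat), l.length ≤ fuel →
      PySem.Chars.count.go [c] fuel l acc = acc + l.count c := by
  induction fuel with
  | zero => intro l acc h
            cases l with
            | nil => simp [PySem.Chars.count.go]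
            | cons x t => simp at h
  | succ n ih =>
    intro l acc h
    cases l with
    | nil => simp [PySem.Chars.count.go]
    | cons x t =>
      by_cases hx : x = c
      · subst hx
        have hpf : [x].isPrefixOf (x :: t) = true := by simp [List.isPrefixOf]
        simp only [PySem.Chars.count.go, hpf, if_true, List.length_cons, List.drop_succ_cons,
          List.drop_zero, List.length_nil]
        rw [ih t (acc + 1) (by simpa using Nat.le_of_succ_le_succ h)]
        simp
        omega
      · have hp : [c].isPrefixOf (x :: t) = false := by
          simp [List.isPrefixOf]; exact fun hh => (hx hh.symm).elim
        simp only [PySem.Chars.count.go, hp, if_false, Bool.false_eq_true]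
        rw [ih t acc (by simpa using Nat.le_of_succ_le_succ h)]
        simp [hx]

theorem pvCount_single (l : List Char) (c : Char) :
    PySem.Chars.count l [c] = l.count c := by
  unfold PySem.Chars.count
  rw [if_neg (by simp)]
  rw [pvCountGo_eq c l.length l 0 (le_refl _)]
  omega
theorem pvChunk (p : List Char) (hp : ',' ∉ p) :
    ∀ (out : List String) (cur : List Char) (d : Int),
      p.foldl pvStepA (out, cur, d)
        = (out, cur ++ p, d + ((p.count '<' : Int) - (p.count '>' : Int))) := by
  induction p with
  | nil => intro out cur d; simp
  | cons c rest ih =>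
    intro out cur d
    have hcr : ',' ∉ rest := fun h => hp (List.mem_cons_of_mem _ h)
    have hcc : c ≠ ',' := fun h => hp (h ▸ List.mem_cons_self)
    by_cases h1 : c = '<'
    · subst h1
      simp only [List.foldl_cons, pvStepA, if_true]
      rw [ih hcr]
      simp
      omega
    · by_cases h2 : c = '>'
      · subst h2
        simp only [List.foldl_cons, pvStepA, if_neg (by decide : ¬ ('>' = '<')), if_true]
        rw [ih hcr]
        simp
        omega
      · simp only [List.foldl_cons, pvStepA, if_neg h1, if_neg h2,
          if_neg (fun hh : c = ',' ∧ d = 0 => hcc hh.1)]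
        rw [ih hcr]
        simp [h1, h2]

theorem pvJoin_append (p : List Char) :
    ∀ (buf : List (List Char)),
      PySem.Chars.join [','] (buf ++ [p]) = pvCurOf buf ++ p := by
  intro buf
  induction buf with
  | nil => simp [pvCurOf, PySem.Chars.join_singleton]
  | cons b bs ih =>
    cases bs with
    | nil => simp [pvCurOf, PySem.Chars.join_cons_cons, PySem.Chars.join_singleton]
    | cons b' bs' =>
      simp only [List.cons_append] at ih ⊢
      rw [PySem.Chars.join_cons_cons, ih]
      simp [pvCurOf]

theorem pvFlush_eq (buf : List String) (p : List Char) :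
    PySem.Str.strip (PySem.Str.join "," (buf ++ [String.ofList p]))
      = PySem.Str.strip (String.ofList (pvCurOf (buf.map String.toList) ++ p)) := by
  unfold PySem.Str.strip
  congr 1
  rw [PySem.Str.toList_join]
  simp only [String.toList_ofList]
  rw [show (",".toList) = [','] from by decide]
  rw [show List.map String.toList (buf ++ [String.ofList p])
      = buf.map String.toList ++ [p] from by simp]
  rw [pvJoin_append]

theorem pvMain : ∀ (ps : List (List Char)), ps ≠ [] → (∀ p ∈ ps, ',' ∉ p) →
    ∀ (out buf : List String) (d : Int),
      (let st := (PySem.Chars.join [','] ps).foldl pvStepA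
          (out, pvCurOf (buf.map String.toList), d)
       st.1 ++ [PySem.Str.strip (String.ofList st.2.1)])
      = (let st := (ps.map String.ofList).foldl pvStepB (out, buf, d)
         if st.2.1 = [] then st.1
         else st.1 ++ [PySem.Str.strip (PySem.Str.join "," st.2.1)]) := by
  intro ps
  induction ps with
  | nil => intro h; exact absurd rfl h
  | cons p rest ih =>
    intro _ hcf out buf d
    have hpcf : ',' ∉ p := hcf p List.mem_cons_self
    have hcount1 : (PySem.Str.count (String.ofList p) "<" : Int) = (p.count '<' : Int) := by
      unfold PySem.Str.count
      rw [String.toList_ofList, show ("<".toList) = ['<'] from by decide, pvCount_single]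
    have hcount2 : (PySem.Str.count (String.ofList p) ">" : Int) = (p.count '>' : Int) := by
      unfold PySem.Str.count
      rw [String.toList_ofList, show (">".toList) = ['>'] from by decide, pvCount_single]
    have e1 : ∀ dd : Int, dd + (PySem.Str.count (String.ofList p) "<" : Int)
        - (PySem.Str.count (String.ofList p) ">" : Int)
        = dd + ((p.count '<' : Int) - (p.count '>' : Int)) := by
      intro dd; rw [hcount1, hcount2]; ring
    cases rest with
    | nil =>
      simp only [PySem.Chars.join_singleton, List.map_cons, List.map_nil, List.foldl_cons,
        List.foldl_nil]
      rw [pvChunk p hpcf]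
      simp only [pvStepB]
      rw [e1 d]
      by_cases hd : d + ((p.count '<' : Int) - (p.count '>' : Int)) = 0
      · rw [if_pos hd]
        simp only [if_true]
        rw [pvFlush_eq buf p]
      · rw [if_neg hd]
        simp only [if_neg (by simp : ¬ (buf ++ [String.ofList p] = []))]
        rw [pvFlush_eq buf p]
    | cons q qs =>
      rw [PySem.Chars.join_cons_cons, List.append_assoc, List.foldl_append]
      rw [pvChunk p hpcf]
      set d' := d + ((p.count '<' : Int) - (p.count '>' : Int)) with hd'
      have hrest : ∀ r ∈ q :: qs, ',' ∉ r := fun r hr => hcf r (List.mem_cons_of_mem _ hr)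
      simp only [List.map_cons, List.foldl_cons, pvStepB]
      rw [e1 d, ← hd']
      by_cases hd : d' = 0
      · have hstep : (([','] : List Char) ++ PySem.Chars.join [','] (q :: qs)).foldl pvStepA
              (out, pvCurOf (buf.map String.toList) ++ p, d')
            = (PySem.Chars.join [','] (q :: qs)).foldl pvStepA
              (out ++ [PySem.Str.strip (String.ofList (pvCurOf (buf.map String.toList) ++ p))], [], d') := by
          simp only [List.cons_append, List.nil_append, List.foldl_cons, pvStepA,
            if_neg (by decide : ¬ (',' = '<')), if_neg (by decide : ¬ (',' = '>'))]
          simp [hd]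
        rw [hstep, if_pos hd, pvFlush_eq buf p]
        exact ih (by simp) hrest
          (out ++ [PySem.Str.strip (String.ofList (pvCurOf (buf.map String.toList) ++ p))]) [] d'
      · have hstep : (([','] : List Char) ++ PySem.Chars.join [','] (q :: qs)).foldl pvStepA
              (out, pvCurOf (buf.map String.toList) ++ p, d')
            = (PySem.Chars.join [','] (q :: qs)).foldl pvStepA
              (out, pvCurOf (buf.map String.toList) ++ p ++ [','], d') := by
          simp only [List.cons_append, List.nil_append, List.foldl_cons, pvStepA,
            if_neg (by decide : ¬ (',' = '<')), if_neg (by decide : ¬ (',' = '>'))]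
          simp [hd]
        rw [hstep, if_neg hd]
        have ihh := ih (by simp) hrest out (buf ++ [String.ofList p]) d'
        rw [show pvCurOf (List.map String.toList (buf ++ [String.ofList p]))
            = pvCurOf (List.map String.toList buf) ++ p ++ [','] from by simp [pvCurOf]] at ihh
        exact ihh
-- ===== VERDICT (by name: the statement is the Claim_ definition above) =====
theorem split_cpp_args_spec : Claim_equal_split_cpp_args := by
  intro arg_str _
  unfold Spec_split_cpp_args
  unfold split_cpp_args split_cpp_args_alt
  set s := PySem.Str.strip (if arg_str = "" then "" else arg_str) with hs
  by_cases h : s = ""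
  · simp [h]
  · simp only [if_neg h]
    have hsplit : (PySem.Str.split? s ",").getD []
        = (pvSplit [] s.toList).map String.ofList := by
      unfold PySem.Str.split? PySem.Chars.split?
      rw [if_neg (by decide)]
      simp [pvSplitOn_eq, show (",".toList) = [','] from by decide]
    rw [hsplit]
    have hne : pvSplit [] s.toList ≠ [] := pvSplit_ne_nil _ _
    have hcf : ∀ p ∈ pvSplit [] s.toList, ',' ∉ p := pvSplit_comma_free _ _ (by simp)
    have hjoin : PySem.Chars.join [','] (pvSplit [] s.toList) = s.toList := by
      rw [pvSplit_join]; simp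
    have hm := pvMain (pvSplit [] s.toList) hne hcf [] [] 0
    rw [hjoin] at hm
    simp only [List.map_nil, show pvCurOf [] = [] from rfl] at hm
    exact hm
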